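-- pv_equiv track=rewrite | github.com/MathoVerse100/Classical-DSA-Implementations | Two_Set_Intersection_Algorithm.py | quadratic_set_intersection
-- ===== SOURCE A (Python) =====
-- def quadratic_set_intersection(set1, set2, set3):
--     for e1 in set1:
--         for e2 in set2:
--             if e1 == e2:
--                 for e3 in set3:
--                     if e1 == e3:
--                         return False
--     return True
-- ===== SOURCE B (Python) =====
-- def quadratic_set_intersection(set1, set2, set3):
--     return not (set(set1) & set(set2) & set(set3))
-- ===== Notes on version B (the rewrite author's own statement) =====
-- stated objective: idiomatic
-- what changed: Replaces the triple-nested equality scan with building hash sets once and testing whether their set intersection is empty.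
import Mathlib
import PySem

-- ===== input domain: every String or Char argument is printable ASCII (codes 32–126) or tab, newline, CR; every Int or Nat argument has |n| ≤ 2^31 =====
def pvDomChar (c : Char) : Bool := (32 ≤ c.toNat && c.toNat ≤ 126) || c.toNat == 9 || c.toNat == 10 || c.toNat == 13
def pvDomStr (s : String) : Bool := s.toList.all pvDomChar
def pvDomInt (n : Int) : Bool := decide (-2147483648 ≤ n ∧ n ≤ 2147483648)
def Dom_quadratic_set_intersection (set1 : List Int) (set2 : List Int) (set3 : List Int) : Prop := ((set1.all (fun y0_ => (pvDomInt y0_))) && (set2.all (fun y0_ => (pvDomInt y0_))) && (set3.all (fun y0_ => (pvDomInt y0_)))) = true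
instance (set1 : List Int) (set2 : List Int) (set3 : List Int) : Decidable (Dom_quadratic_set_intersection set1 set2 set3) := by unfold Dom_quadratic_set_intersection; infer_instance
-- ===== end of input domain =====

-- B builds the three sets once and tests their intersection for emptiness, instead of A's triple-nested scan.


-- ===== PORT A =====
-- inner 'for e3 in set3: if e1 == e3: return False' — true = the early return fires
def qsiLoop3 (e1 : Int) (set3 : List Int) : Bool :=
  match set3 with
  | [] => false
  | e3 :: rest => if e1 = e3 then true else qsiLoop3 e1 rest

-- middle 'for e2 in set2: if e1 == e2: <loop3>' — true = some early return fired
def qsiLoop2 (e1 : Int) (set2 : List Int) (set3 : List Int) : Bool :=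
  match set2 with
  | [] => false
  | e2 :: rest =>
    if e1 = e2 then
      if qsiLoop3 e1 set3 then true else qsiLoop2 e1 rest set3
    else qsiLoop2 e1 rest set3

def quadratic_set_intersection (set1 : List Int) (set2 : List Int) (set3 : List Int) : Bool :=
  match set1 with
  | [] => true
  | e1 :: rest =>
    if qsiLoop2 e1 set2 set3 then false else quadratic_set_intersection rest set2 set3

-- ===== PORT B =====
-- not (set(set1) & set(set2) & set(set3))
def quadratic_set_intersection_alt (set1 : List Int) (set2 : List Int) (set3 : List Int) : Bool :=
  (PySem.Set.inter (PySem.Set.inter (PySem.Set.ofList set1) (PySem.Set.ofList set2)) (PySem.Set.ofList set3)).isEmpty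

-- ===== PRECONDITION & SPEC =====
def Spec_quadratic_set_intersection (set1 : List Int) (set2 : List Int) (set3 : List Int) (out : Bool) : Prop := out = quadratic_set_intersection_alt set1 set2 set3
instance (set1 : List Int) (set2 : List Int) (set3 : List Int) (out : Bool) : Decidable (Spec_quadratic_set_intersection set1 set2 set3 out) := by unfold Spec_quadratic_set_intersection; infer_instance

-- ===== CLAIM (what is proved, stated in full; the proofs are below) =====
def Claim_equal_quadratic_set_intersection : Prop := ∀ (set1 : List Int) (set2 : List Int) (set3 : List Int), Dom_quadratic_set_intersection set1 set2 set3 → Spec_quadratic_set_intersection set1 set2 set3 (quadratic_set_intersection set1 set2 set3)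

-- ===== LEMMAS AND PROOFS =====
theorem qsiLoop3_eq (e1 : Int) (s3 : List Int) : qsiLoop3 e1 s3 = decide (e1 ∈ s3) := by
  induction s3 with
  | nil => simp [qsiLoop3]
  | cons h t ih => by_cases he : e1 = h <;> simp [qsiLoop3, he, ih]

theorem qsiLoop2_eq (e1 : Int) (s2 s3 : List Int) :
    qsiLoop2 e1 s2 s3 = decide (e1 ∈ s2 ∧ e1 ∈ s3) := by
  induction s2 with
  | nil => simp [qsiLoop2]
  | cons h t ih =>
    by_cases he : e1 = h
    · subst he
      simp [qsiLoop2, ih, qsiLoop3_eq]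
    · simp [qsiLoop2, he, ih]

theorem qsiA_eq (s1 s2 s3 : List Int) :
    quadratic_set_intersection s1 s2 s3 = decide (∀ e ∈ s1, ¬(e ∈ s2 ∧ e ∈ s3)) := by
  induction s1 with
  | nil => simp [quadratic_set_intersection]
  | cons h t ih =>
    by_cases hm : h ∈ s2 ∧ h ∈ s3 <;>
      simp [quadratic_set_intersection, qsiLoop2_eq, hm, ih] <;> tauto

theorem qsiB_eq (s1 s2 s3 : List Int) :
    quadratic_set_intersection_alt s1 s2 s3 = decide (∀ e ∈ s1, ¬(e ∈ s2 ∧ e ∈ s3)) := by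
  unfold quadratic_set_intersection_alt
  rcases Bool.eq_false_or_eq_true ((PySem.Set.inter (PySem.Set.inter (PySem.Set.ofList s1) (PySem.Set.ofList s2)) (PySem.Set.ofList s3)).isEmpty) with h | h
  · rw [h]
    rw [List.isEmpty_iff] at h
    symm; rw [decide_eq_true_iff]
    intro e he ⟨h2, h3⟩
    have : e ∈ PySem.Set.inter (PySem.Set.inter (PySem.Set.ofList s1) (PySem.Set.ofList s2)) (PySem.Set.ofList s3) := by
      simp only [PySem.Set.mem_inter, PySem.Set.mem_ofList]; exact ⟨⟨he, h2⟩, h3⟩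
    rw [h] at this; exact absurd this (List.not_mem_nil)
  · rw [h]
    rw [List.isEmpty_eq_false_iff_exists_mem] at h
    obtain ⟨x, hx⟩ := h
    simp only [PySem.Set.mem_inter, PySem.Set.mem_ofList] at hx
    symm; simp only [decide_eq_false_iff_not]
    push_neg
    exact ⟨x, hx.1.1, hx.1.2, hx.2⟩

-- ===== VERDICT (by name: the statement is the Claim_ definition above) =====
theorem quadratic_set_intersection_spec : Claim_equal_quadratic_set_intersection := by
  intro s1 s2 s3 _
  unfold Spec_quadratic_set_intersection
  rw [qsiA_eq, qsiB_eq]
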